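-- pv_equiv track=rewrite | github.com/MitraSascha/simulation | app/simulation/persona_generator.py | _dedupe_names
-- ===== SOURCE A (Python) =====
-- def _dedupe_names(personas: list[dict]) -> list[dict]:
--     """Eindeutige Namen via Suffix-Counter (Anna Schmidt, Anna Schmidt 2, ...)."""
--     seen: dict[str, int] = {}
--     for p in personas:
--         original = (p.get("name") or "").strip() or "Persona"
--         key = original.lower()
--         if key not in seen:
--             seen[key] = 1
--             p["name"] = original
--         else:
--             seen[key] += 1
--             p["name"] = f"{original} {seen[key]}"
--     return personas
-- ===== SOURCE B (Python) =====
-- def _dedupe_names(personas: list[dict]) -> list[dict]: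
--     """Eindeutige Namen via Gruppierungs-Index statt laufendem Counter."""
--     groups: dict[str, list[tuple[int, str]]] = {}
--     for i, p in enumerate(personas):
--         original = (p.get("name") or "").strip() or "Persona"
--         groups.setdefault(original.lower(), []).append((i, original))
--     new_name: dict[int, str] = {}
--     for members in groups.values():
--         for j, (i, original) in enumerate(members):
--             new_name[i] = original if j == 0 else f"{original} {j + 1}"
--     for i, p in enumerate(personas):
--         p["name"] = new_name[i]
--     return personas
-- ===== Notes on version B (the rewrite author's own statement) =====
-- stated objective: alternative
-- what changed: Replaces A's single pass with a running seen-counter dict by a three-phase grouping algorithm: build an index mapping each lowercase key to its ordered group of (index, original) entries, then number each group with enumerate (first keeps its original, the j-th gets 'original j+1'), then write the names back by index.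
import Mathlib
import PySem

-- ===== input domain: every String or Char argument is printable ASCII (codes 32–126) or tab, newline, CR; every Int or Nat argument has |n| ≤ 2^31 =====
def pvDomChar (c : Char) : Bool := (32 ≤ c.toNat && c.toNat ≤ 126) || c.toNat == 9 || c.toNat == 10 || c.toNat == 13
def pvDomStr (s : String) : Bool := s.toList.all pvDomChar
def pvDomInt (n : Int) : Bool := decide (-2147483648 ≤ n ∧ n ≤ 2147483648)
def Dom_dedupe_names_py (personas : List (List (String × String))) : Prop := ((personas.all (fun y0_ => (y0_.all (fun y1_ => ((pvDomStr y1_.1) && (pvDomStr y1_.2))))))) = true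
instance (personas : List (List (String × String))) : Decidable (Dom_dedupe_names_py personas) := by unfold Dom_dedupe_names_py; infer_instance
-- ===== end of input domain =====

-- B replaces A's single-pass running counter with a three-phase grouping index
-- (group personas by lowercase key, number each group by enumerate, write names back);
-- objective: alternative. Both Pythons mutate the persona dicts in place identically;
-- the equivalence proved here is about the returned value.

-- ===== PORT A =====
-- literal transliteration of A: one pass with a mutable `seen : dict[str,int]`
def dedupeALoop (seen : PySem.Dict String Int) (ps : List (List (String × String))) : List (List (String × String)) :=
  match ps with
  | [] => []
  | p :: rest =>
    let t := PySem.Str.strip (((PySem.Dict.mk p).get? "name").getD "")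
    let original := if t = "" then "Persona" else t
    let key := PySem.Str.lower original
    if seen.contains key = false then
      ((PySem.Dict.mk p).insert "name" original).items
        :: dedupeALoop (seen.insert key 1) rest
    else
      let n := seen.getD key 0 + 1
      ((PySem.Dict.mk p).insert "name" (original ++ " " ++ PySem.Int.toStr n)).items
        :: dedupeALoop (seen.insert key n) rest

def dedupe_names_py (personas : List (List (String × String))) : List (List (String × String)) :=
  dedupeALoop PySem.Dict.empty personas

-- ===== PORT B =====
-- B phase 1: `groups.setdefault(key, []).append((i, original))` over `enumerate(personas)`
def altGroups (personas : List (List (String × String))) : PySem.Dict String (List (Int × String)) :=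
  (PySem.List.enumerate personas).foldl (fun g ip =>
    let t := PySem.Str.strip (((PySem.Dict.mk ip.2).get? "name").getD "")
    let original := if t = "" then "Persona" else t
    g.modify (PySem.Str.lower original) [] (· ++ [(ip.1, original)])) PySem.Dict.empty

-- B phase 2: `for members in groups.values(): for j, (i, original) in enumerate(members): new_name[i] = …`
def altNames (groups : PySem.Dict String (List (Int × String))) : PySem.Dict Int String :=
  groups.values.foldl (fun d members =>
    (PySem.List.enumerate members).foldl (fun d ji =>
      d.insert ji.2.1 (if ji.1 = 0 then ji.2.2
                       else ji.2.2 ++ " " ++ PySem.Int.toStr (ji.1 + 1))) d) PySem.Dict.empty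

-- B phase 3: `p["name"] = new_name[i]` (every index is present in new_name, so the
-- total getD models Python's new_name[i] exactly; in-place mutation modeled by rebuilding the list)
def dedupe_names_py_alt (personas : List (List (String × String))) : List (List (String × String)) :=
  let newName := altNames (altGroups personas)
  (PySem.List.enumerate personas).map (fun ip =>
    ((PySem.Dict.mk ip.2).insert "name" (newName.getD ip.1 "")).items)

-- ===== PRECONDITION & SPEC =====
def Spec_dedupe_names_py (personas : List (List (String × String))) (out : List (List (String × String))) : Prop := out = dedupe_names_py_alt personas
instance (personas : List (List (String × String))) (out : List (List (String × String))) : Decidable (Spec_dedupe_names_py personas out) := by unfold Spec_dedupe_names_py; infer_instance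

-- ===== CLAIM (what is proved, stated in full; the proofs are below) =====
def Claim_equal_dedupe_names_py : Prop := ∀ (personas : List (List (String × String))), Dom_dedupe_names_py personas → Spec_dedupe_names_py personas (dedupe_names_py personas)

-- ===== LEMMAS AND PROOFS =====

def pvOrig (p : List (String × String)) : String :=
  let t := PySem.Str.strip (((PySem.Dict.mk p).get? "name").getD "")
  if t = "" then "Persona" else t

def pvKey (p : List (String × String)) : String := PySem.Str.lower (pvOrig p)

def pvCnt (k : String) (l : List (List (String × String))) : Nat :=
  l.countP (fun p => pvKey p == k)

def pvRename (o : String) (c : Nat) : String :=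
  if c = 0 then o else o ++ " " ++ PySem.Int.toStr ((c : Int) + 1)

def pvSet (p : List (String × String)) (s : String) : List (String × String) :=
  ((PySem.Dict.mk p).insert "name" s).items

-- canonical form: each element named by the count of equal keys in the prefix before it
def pvGo (pref ps : List (List (String × String))) : List (List (String × String)) :=
  match ps with
  | [] => []
  | p :: rest => pvSet p (pvRename (pvOrig p) (pvCnt (pvKey p) pref)) :: pvGo (pref ++ [p]) rest

theorem pvCnt_append_singleton (k : String) (l : List (List (String × String))) (p : List (String × String)) :
    pvCnt k (l ++ [p]) = pvCnt k l + (if pvKey p = k then 1 else 0) := by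
  by_cases h : pvKey p = k
  · simp [pvCnt, List.countP_append, h]
  · simp [pvCnt, List.countP_append, h]

theorem dedupeALoop_eq_go (ps : List (List (String × String))) :
    ∀ (pref : List (List (String × String))) (seen : PySem.Dict String Int),
      (∀ k, seen.getD k 0 = (pvCnt k pref : Int)) →
      (∀ k, seen.contains k = decide (pvCnt k pref ≠ 0)) →
      dedupeALoop seen ps = pvGo pref ps := by
  induction ps with
  | nil => intro pref seen _ _; rfl
  | cons p rest ih =>
    intro pref seen hD hC
    have hD2 : ∀ (v : Int), v = (pvCnt (pvKey p) pref : Int) + 1 →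
        ∀ k, (seen.insert (pvKey p) v).getD k 0 = (pvCnt k (pref ++ [p]) : Int) := by
      intro v hv k
      rw [PySem.Dict.getD_insert, pvCnt_append_singleton]
      by_cases h : k = pvKey p
      · subst h; simp [hv]
      · have h2 : ¬ pvKey p = k := fun e => h e.symm
        simp [h, h2, hD]
    have hC2 : ∀ (v : Int) (k : String),
        (seen.insert (pvKey p) v).contains k = decide (pvCnt k (pref ++ [p]) ≠ 0) := by
      intro v k
      rw [PySem.Dict.contains_insert, pvCnt_append_singleton]
      by_cases h : k = pvKey p
      · subst h; simp
      · have h2 : ¬ pvKey p = k := fun e => h e.symm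
        simp [h, h2, hC]
    show (if seen.contains (pvKey p) = false then
            ((PySem.Dict.mk p).insert "name" (pvOrig p)).items
              :: dedupeALoop (seen.insert (pvKey p) 1) rest
          else
            ((PySem.Dict.mk p).insert "name"
                (pvOrig p ++ " " ++ PySem.Int.toStr (seen.getD (pvKey p) 0 + 1))).items
              :: dedupeALoop (seen.insert (pvKey p) (seen.getD (pvKey p) 0 + 1)) rest)
        = pvSet p (pvRename (pvOrig p) (pvCnt (pvKey p) pref)) :: pvGo (pref ++ [p]) rest
    by_cases hz : pvCnt (pvKey p) pref = 0
    · have hc : seen.contains (pvKey p) = false := by rw [hC]; simp [hz]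
      rw [if_pos hc]
      refine congrArg₂ (· :: ·) ?_ (ih _ _ (hD2 1 (by rw [hz]; norm_num)) (hC2 1))
      simp [pvSet, pvRename, hz]
    · have hc : seen.contains (pvKey p) = true := by rw [hC]; simp [hz]
      rw [if_neg (by simp [hc])]
      refine congrArg₂ (· :: ·) ?_ (ih _ _ (hD2 _ (by rw [hD])) (hC2 _))
      simp only [pvSet, pvRename, if_neg hz, hD]

theorem pvGo_length (pref ps : List (List (String × String))) : (pvGo pref ps).length = ps.length := by
  induction ps generalizing pref with
  | nil => rfl
  | cons p rest ih => simp [pvGo, ih]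

theorem pvGo_getElem (ps : List (List (String × String))) :
    ∀ (pref : List (List (String × String))) (i : Nat) (h : i < ps.length),
      (pvGo pref ps)[i]'(by rw [pvGo_length]; exact h) =
        pvSet (ps[i]'h) (pvRename (pvOrig (ps[i]'h)) (pvCnt (pvKey (ps[i]'h)) (pref ++ ps.take i))) := by
  induction ps with
  | nil => intro _ i h; exact absurd h (by simp)
  | cons p rest ih =>
    intro pref i h
    cases i with
    | zero => simp [pvGo]
    | succ j =>
      have hj : j < rest.length := by simpa using h
      simp only [pvGo, List.getElem_cons_succ, List.take_succ_cons]
      rw [ih (pref ++ [p]) j hj]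
      simp

-- ===== B-side lemmas =====

def pvF (personas : List (List (String × String))) (k : String) : List (Int × List (String × String)) :=
  (PySem.List.enumerate personas).filter (fun ip => pvKey ip.2 == k)

def pvNameEntry (ji : Int × (Int × String)) : Int × String :=
  (ji.2.1, if ji.1 = 0 then ji.2.2 else ji.2.2 ++ " " ++ PySem.Int.toStr (ji.1 + 1))

def pvFn (members : List (Int × String)) : List (Int × String) :=
  (PySem.List.enumerate members).map pvNameEntry

theorem altGroups_eq (personas : List (List (String × String))) :
    altGroups personas =
      ((PySem.List.enumerate personas).map (fun ip => (pvKey ip.2, (ip.1, pvOrig ip.2)))).foldl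
        (fun d p => d.modify p.1 [] (· ++ [p.2])) PySem.Dict.empty := by
  rw [List.foldl_map]
  rfl

theorem getD_altGroups (personas : List (List (String × String))) (k : String) :
    (altGroups personas).getD k [] = (pvF personas k).map (fun ip => (ip.1, pvOrig ip.2)) := by
  rw [altGroups_eq, PySem.Dict.getD_foldl_modify_append]
  simp [pvF, List.filter_map, Function.comp_def]

theorem nodup_keys_altGroups (personas : List (List (String × String))) :
    (altGroups personas).keys.Nodup := by
  rw [altGroups_eq]
  exact PySem.Dict.nodup_keys_foldl_modify_key
    ((PySem.List.enumerate personas).map (fun ip => (pvKey ip.2, (ip.1, pvOrig ip.2))))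
    (fun p => p.1) [] (fun _ p l => l ++ [p.2]) PySem.Dict.empty PySem.Dict.nodup_keys_empty

theorem altNames_eq (g : PySem.Dict String (List (Int × String))) :
    altNames g = (g.values.flatMap pvFn).foldl (fun d p => d.insert p.1 p.2) PySem.Dict.empty := by
  rw [List.foldl_flatMap]
  unfold altNames pvFn
  congr 1
  funext d members
  rw [List.foldl_map]
  rfl

theorem pvGetD_foldl_insert_unique {κ ν : Type} [BEq κ] [LawfulBEq κ]
    (l : List (κ × ν)) :
    ∀ (d : PySem.Dict κ ν) (k : κ) (v d0 : ν),
      ((k, v) ∈ l ∨ d.getD k d0 = v) →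
      (∀ p ∈ l, p.1 = k → p.2 = v) →
      (l.foldl (fun d p => d.insert p.1 p.2) d).getD k d0 = v := by
  induction l with
  | nil =>
    intro d k v d0 hmem _
    rcases hmem with h | h
    · exact absurd h (by simp)
    · exact h
  | cons p l ih =>
    intro d k v d0 hmem huniq
    simp only [List.foldl_cons]
    by_cases hk : p.1 = k
    · refine ih _ _ _ _ (Or.inr ?_) (fun q hq => huniq q (List.mem_cons_of_mem _ hq))
      rw [← hk, PySem.Dict.getD_insert_self]
      exact huniq p (List.mem_cons_self) hk
    · refine ih _ _ _ _ ?_ (fun q hq => huniq q (List.mem_cons_of_mem _ hq))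
      rcases hmem with h | h
      · rcases List.mem_cons.mp h with h | h
        · exact absurd (by rw [← h]) hk
        · exact Or.inl h
      · exact Or.inr (by rw [PySem.Dict.getD_insert_of_ne _ _ _ (fun e => hk e.symm), h])

theorem pvFilterEnum_getElem? {α : Type} (q : α → Bool) :
    ∀ (l : List α) (s : Int) (i : Nat) (h : i < l.length), q (l[i]'h) = true →
      ((PySem.List.enumerate l s).filter (fun ip => q ip.2))[(l.take i).countP q]? =
        some (s + i, l[i]'h) := by
  intro l
  induction l with
  | nil => intro s i h; exact absurd h (by simp)
  | cons x xs ih =>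
    intro s i h hq
    rw [PySem.List.enumerate_cons]
    cases i with
    | zero =>
      simp only [List.getElem_cons_zero] at hq
      simp [hq]
    | succ j =>
      have hj : j < xs.length := by simpa using h
      simp only [List.getElem_cons_succ] at hq
      have key := ih (s + 1) j hj hq
      have harith : (s + 1 + (j : Int)) = s + ((j + 1 : Nat) : Int) := by push_cast; ring
      by_cases hx : q x = true
      · simpa [List.take_succ_cons, List.countP_cons, List.filter_cons, hx, harith] using key
      · have hx' : q x = false := by simpa using hx
        simpa [List.take_succ_cons, List.countP_cons, List.filter_cons, hx', harith] using key

theorem pvFilterEnum_mem {α : Type} (q : α → Bool) (l : List α) (s : Int)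
    (p : Int × α) (hp : p ∈ (PySem.List.enumerate l s).filter (fun ip => q ip.2)) :
    ∃ (k : Nat) (h : k < l.length), p = (s + k, l[k]'h) ∧ q (l[k]'h) = true := by
  rcases List.mem_filter.mp hp with ⟨hmem, hq⟩
  rcases (PySem.List.mem_enumerate_iff _ _ _).mp hmem with ⟨k, h, hpe⟩
  exact ⟨k, h, hpe, by rw [hpe] at hq; simpa using hq⟩

theorem pvFilterEnum_pairwise {α : Type} (q : α → Bool) (l : List α) (s : Int) :
    ((PySem.List.enumerate l s).filter (fun ip => q ip.2)).Pairwise (fun p q => p.1 < q.1) :=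
  (PySem.List.pairwise_lt_enumerate l s).sublist (List.filter_sublist)

set_option maxHeartbeats 1000000 in
theorem names_getD (personas : List (List (String × String))) (i : Nat) (h : i < personas.length) :
    (altNames (altGroups personas)).getD ((i : Int)) "" =
      pvRename (pvOrig (personas[i]'h)) (pvCnt (pvKey (personas[i]'h)) (personas.take i)) := by
  have hnd := nodup_keys_altGroups personas
  have hvals := PySem.Dict.values_eq_map_keys (altGroups personas) hnd []
  have hF := pvFilterEnum_getElem? (fun p => pvKey p == pvKey (personas[i]'h)) personas 0 i h (by simp)
  have hclt : pvCnt (pvKey (personas[i]'h)) (personas.take i) < (pvF personas (pvKey (personas[i]'h))).length := by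
    have := List.getElem?_eq_some_iff.mp hF
    exact this.1
  have hFc : (pvF personas (pvKey (personas[i]'h)))[pvCnt (pvKey (personas[i]'h)) (personas.take i)]? =
      some ((0 : Int) + i, personas[i]'h) := hF
  -- the members list of persona i's group
  have hmembers : (altGroups personas).getD (pvKey (personas[i]'h)) [] =
      (pvF personas (pvKey (personas[i]'h))).map (fun ip => (ip.1, pvOrig ip.2)) :=
    getD_altGroups personas _
  have hmemc : ((altGroups personas).getD (pvKey (personas[i]'h)) [])[pvCnt (pvKey (personas[i]'h)) (personas.take i)]? =
      some ((0 : Int) + i, pvOrig (personas[i]'h)) := by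
    rw [hmembers, List.getElem?_map, hFc]
    rfl
  -- the group's key is present in the dict
  have hkmem : pvKey (personas[i]'h) ∈ (altGroups personas).keys := by
    rw [← PySem.Dict.contains_iff_mem_keys]
    by_contra hc
    have hcf : (altGroups personas).contains (pvKey (personas[i]'h)) = false := by
      cases hcc : (altGroups personas).contains (pvKey (personas[i]'h)) with
      | false => rfl
      | true => exact absurd hcc hc
    rw [PySem.Dict.getD_of_not_contains _ _ hcf] at hmemc
    simp at hmemc
  have hmemvals : (altGroups personas).getD (pvKey (personas[i]'h)) [] ∈ (altGroups personas).values := by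
    rw [hvals]
    exact List.mem_map_of_mem hkmem
  -- the flat entry for index i
  have hentry : (pvFn ((altGroups personas).getD (pvKey (personas[i]'h)) []))[pvCnt (pvKey (personas[i]'h)) (personas.take i)]? =
      some ((i : Int), pvRename (pvOrig (personas[i]'h)) (pvCnt (pvKey (personas[i]'h)) (personas.take i))) := by
    rw [pvFn, List.getElem?_map, PySem.List.getElem?_enumerate, hmemc]
    simp only [Option.map_some, Option.some.injEq, pvNameEntry, pvRename]
    by_cases hz : pvCnt (pvKey (personas[i]'h)) (personas.take i) = 0
    · simp [hz]
    · have hnz : ¬ ((pvCnt (pvKey (personas[i]'h)) (personas.take i) : Int) = 0) := by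
        omega
      simp only [zero_add]
      rw [if_neg hnz, if_neg hz]
  have hmem_flat : ((i : Int), pvRename (pvOrig (personas[i]'h)) (pvCnt (pvKey (personas[i]'h)) (personas.take i))) ∈
      (altGroups personas).values.flatMap pvFn :=
    List.mem_flatMap.mpr ⟨_, hmemvals, List.mem_of_getElem? hentry⟩
  -- uniqueness: any flat entry keyed by i carries that very name
  have huniq : ∀ p ∈ (altGroups personas).values.flatMap pvFn, p.1 = (i : Int) →
      p.2 = pvRename (pvOrig (personas[i]'h)) (pvCnt (pvKey (personas[i]'h)) (personas.take i)) := by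
    intro p hp hpi
    rcases List.mem_flatMap.mp hp with ⟨members, hmem', hpmem⟩
    obtain ⟨k', hk'mem, hmembers'⟩ : ∃ k', k' ∈ (altGroups personas).keys ∧
        members = (altGroups personas).getD k' [] := by
      rw [hvals] at hmem'
      rcases List.mem_map.mp hmem' with ⟨k', h1, h2⟩
      exact ⟨k', h1, h2.symm⟩
    simp only [pvFn] at hpmem
    rcases List.mem_map.mp hpmem with ⟨ji, hji, hpe⟩
    rcases (PySem.List.mem_enumerate_iff _ _ _).mp hji with ⟨j, hjlt, hjie⟩
    have hji1 : ji.1 = (0 : Int) + j := by rw [hjie]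
    have hjq : members[j]? = some ji.2 := by
      rw [hjie]
      exact List.getElem?_eq_some_iff.mpr ⟨hjlt, rfl⟩
    rw [hmembers', getD_altGroups, List.getElem?_map] at hjq
    rcases Option.map_eq_some_iff.mp hjq with ⟨a, haq, hae⟩
    have hjltF : j < (pvF personas k').length := (List.getElem?_eq_some_iff.mp haq).1
    have haget : (pvF personas k')[j]'hjltF = a := (List.getElem?_eq_some_iff.mp haq).2
    rcases pvFilterEnum_mem (fun p => pvKey p == k') personas 0 a (List.mem_of_getElem? haq)
      with ⟨m, hm, hFe, hqm⟩
    have hji2 : ji.2 = ((0 : Int) + m, pvOrig (personas[m]'hm)) := by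
      rw [← hae, hFe]
    have hpm : p = pvNameEntry ((0 : Int) + j, ((0 : Int) + m, pvOrig (personas[m]'hm))) := by
      rw [← hpe, ← hji1, ← hji2]
    have hmi : m = i := by
      have h1 : p.1 = (0 : Int) + m := by rw [hpm]; rfl
      omega
    subst hmi
    have hkk : k' = pvKey (personas[m]'hm) := (eq_of_beq hqm).symm
    subst hkk
    have hjc : j = pvCnt (pvKey (personas[m]'hm)) (personas.take m) := by
      have hnodupF : ((pvF personas (pvKey (personas[m]'hm))).map (fun p => p.1)).Nodup :=
        List.Pairwise.imp (fun hlt => ne_of_lt hlt)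
          (List.pairwise_map.mpr (pvFilterEnum_pairwise (fun p => pvKey p == pvKey (personas[m]'hm)) personas 0))
      have h1 : ((pvF personas (pvKey (personas[m]'hm))).map (fun p => p.1))[j]? = some ((0 : Int) + m) := by
        rw [List.getElem?_map, haq, hFe]
        rfl
      have h2 : ((pvF personas (pvKey (personas[m]'hm))).map (fun p => p.1))[pvCnt (pvKey (personas[m]'hm)) (personas.take m)]? =
          some ((0 : Int) + m) := by
        rw [List.getElem?_map, hFc]
        rfl
      exact List.getElem?_inj (by rw [List.length_map]; exact hjltF) hnodupF (h1.trans h2.symm)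
    rw [hpm, hjc]
    simp only [pvNameEntry, pvRename, zero_add]
    by_cases hz : pvCnt (pvKey (personas[m]'hm)) (personas.take m) = 0
    · simp [hz]
    · have hnz : ¬ ((pvCnt (pvKey (personas[m]'hm)) (personas.take m) : Int) = 0) := by omega
      rw [if_neg hnz, if_neg hz]
  rw [altNames_eq]
  exact pvGetD_foldl_insert_unique _ _ _ _ _ (Or.inl hmem_flat) huniq

theorem alt_eq_go (personas : List (List (String × String))) :
    dedupe_names_py_alt personas = pvGo [] personas := by
  apply List.ext_getElem
  · simp [dedupe_names_py_alt, pvGo_length, PySem.List.length_enumerate]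
  · intro i h1 h2
    have hi : i < personas.length := by
      simpa [dedupe_names_py_alt, PySem.List.length_enumerate] using h1
    rw [pvGo_getElem personas [] i hi]
    simp only [dedupe_names_py_alt, List.getElem_map, PySem.List.getElem_enumerate]
    have h0 : ((0 : Int) + (i : Int)) = (i : Int) := by omega
    rw [h0, names_getD personas i hi]
    simp [pvSet]

-- ===== VERDICT (by name: the statement is the Claim_ definition above) =====
theorem dedupe_names_py_spec : Claim_equal_dedupe_names_py := by
  intro personas _
  unfold Spec_dedupe_names_py dedupe_names_py
  rw [alt_eq_go]
  exact dedupeALoop_eq_go personas [] PySem.Dict.empty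
    (fun k => by simp [pvCnt, PySem.Dict.getD_empty])
    (fun k => by simp [pvCnt, PySem.Dict.contains_empty])
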